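-- pv_equiv track=rewrite | github.com/GundalaNikhil/DSA | dsa-problems/Greedy/solutions/python/GRD-004-library-power-backup.py | min_battery_swaps
-- ===== SOURCE A (Python) =====
-- def min_battery_swaps(n: int, T: int, capacities: list) -> int:
--     if sum(capacities) < T:
--         return -1
--
--     # Sort descending
--     capacities.sort(reverse=True)
--
--     current_sum = 0
--     count = 0
--
--     for c in capacities:
--         current_sum += c
--         count += 1
--         if current_sum >= T:
--             return count - 1
--
--     return -1
-- ===== SOURCE B (Python) =====
-- # B: selection instead of sorting -- repeatedly extract the current maximum until the
-- # running sum reaches T.  Return-value equivalent to A; note A sorts `capacities` in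
-- # place while B leaves the argument untouched.
-- def min_battery_swaps(n: int, T: int, capacities: list) -> int:
--     if sum(capacities) < T:
--         return -1
--     pool = list(capacities)
--     s = 0
--     taken = 0
--     while pool:
--         m = max(pool)
--         pool.remove(m)
--         s += m
--         taken += 1
--         if s >= T:
--             return taken - 1
--     return -1
-- ===== Notes on version B (the rewrite author's own statement) =====
-- stated objective: alternative
-- what changed: Replaces A's full descending sort followed by a prefix-sum scan with a selection loop that repeatedly extracts the current maximum from an unsorted pool until the running sum reaches T (no sort; B also does not mutate the input list, while A sorts it in place).
import Mathlib
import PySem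

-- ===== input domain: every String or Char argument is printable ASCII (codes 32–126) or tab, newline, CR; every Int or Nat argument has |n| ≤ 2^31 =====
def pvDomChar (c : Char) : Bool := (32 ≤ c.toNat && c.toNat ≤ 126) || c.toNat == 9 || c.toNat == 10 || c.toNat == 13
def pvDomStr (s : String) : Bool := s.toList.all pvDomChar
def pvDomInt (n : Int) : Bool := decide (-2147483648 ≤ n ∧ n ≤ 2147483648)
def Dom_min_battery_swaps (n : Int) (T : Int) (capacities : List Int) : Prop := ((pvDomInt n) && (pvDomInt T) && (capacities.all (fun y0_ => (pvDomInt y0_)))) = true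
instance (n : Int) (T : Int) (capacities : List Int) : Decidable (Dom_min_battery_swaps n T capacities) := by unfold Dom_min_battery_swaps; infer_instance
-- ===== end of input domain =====

-- B replaces A's descending sort + prefix scan by repeated max-extraction from an
-- unsorted pool (alternative decomposition); return-value equivalence only: A sorts
-- its list argument in place, B does not mutate it.

-- ===== PORT A =====
-- the for-loop over the descending-sorted list, carrying (current_sum, count)
def pvLoopA (T : Int) : List Int → Int → Int → Int
  | [], _, _ => -1
  | c :: rest, s, cnt =>
    if s + c ≥ T then (cnt + 1) - 1 else pvLoopA T rest (s + c) (cnt + 1)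

def min_battery_swaps (n : Int) (T : Int) (capacities : List Int) : Int :=
  if capacities.sum < T then -1
  else pvLoopA T (PySem.List.sorted capacities (fun x => x) true) 0 0

-- ===== PORT B =====
-- the while-loop: pop the max of the pool each round
def pvLoopB (T : Int) (pool : List Int) (s cnt : Int) : Int :=
  match hm : PySem.List.max? pool (fun x => x) with
  | none => -1
  | some m =>
    let pool' := (PySem.List.remove? pool m).getD []
    if s + m ≥ T then (cnt + 1) - 1 else pvLoopB T pool' (s + m) (cnt + 1)
termination_by pool.length
decreasing_by
  have hmem : m ∈ pool := PySem.List.max?_mem hm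
  have := List.length_erase_of_mem hmem
  have hpos : 0 < pool.length := List.length_pos_of_mem hmem
  simp [PySem.List.remove?_eq_some_erase pool m hmem]
  omega

def min_battery_swaps_alt (n : Int) (T : Int) (capacities : List Int) : Int :=
  if capacities.sum < T then -1
  else pvLoopB T capacities 0 0

-- ===== PRECONDITION & SPEC =====
def Spec_min_battery_swaps (n : Int) (T : Int) (capacities : List Int) (out : Int) : Prop := out = min_battery_swaps_alt n T capacities
instance (n : Int) (T : Int) (capacities : List Int) (out : Int) : Decidable (Spec_min_battery_swaps n T capacities out) := by unfold Spec_min_battery_swaps; infer_instance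

-- ===== CLAIM (what is proved, stated in full; the proofs are below) =====
def Claim_equal_min_battery_swaps : Prop := ∀ (n : Int) (T : Int) (capacities : List Int), Dom_min_battery_swaps n T capacities → Spec_min_battery_swaps n T capacities (min_battery_swaps n T capacities)

-- ===== LEMMAS AND PROOFS =====

-- descending sort of a nonempty pool = its (first) max, then descending sort of the rest
lemma sorted_rev_eq_max_cons (pool : List Int) (m : Int)
    (hm : PySem.List.max? pool (fun x => x) = some m) :
    PySem.List.sorted pool (fun x => x) true
      = m :: PySem.List.sorted (pool.erase m) (fun x => x) true := by
  have hmem : m ∈ pool := PySem.List.max?_mem hm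
  have hperm1 : (PySem.List.sorted pool (fun x => x) true).Perm pool :=
    PySem.List.sorted_perm ..
  have hperm2 : (m :: PySem.List.sorted (pool.erase m) (fun x => x) true).Perm pool := by
    refine List.Perm.trans (List.Perm.cons m (PySem.List.sorted_perm ..)) ?_
    exact (List.perm_cons_erase hmem).symm
  have hs1 : (PySem.List.sorted pool (fun x => x) true).Pairwise (· ≥ ·) := by
    have := PySem.List.sorted_pairwise_rev (xs := pool) (key := fun x => x)
    simpa [ge_iff_le] using this
  have hs2 : (m :: PySem.List.sorted (pool.erase m) (fun x => x) true).Pairwise (· ≥ ·) := by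
    refine List.Pairwise.cons ?_ ?_
    · intro y hy
      have hy' : y ∈ pool.erase m := (PySem.List.mem_sorted ..).mp hy
      exact PySem.List.max?_isMax hm y (List.mem_of_mem_erase hy')
    · have := PySem.List.sorted_pairwise_rev (xs := pool.erase m) (key := fun x => x)
      simpa [ge_iff_le] using this
  exact List.Perm.eq_of_pairwise (fun a b _ _ h1 h2 => le_antisymm h2 h1)
    hs1 hs2 (hperm1.trans hperm2.symm)

lemma loopA_eq_loopB (T : Int) : ∀ (pool : List Int) (s cnt : Int),
    pvLoopA T (PySem.List.sorted pool (fun x => x) true) s cnt = pvLoopB T pool s cnt := by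
  intro pool
  induction hlen : pool.length using Nat.strong_induction_on generalizing pool with
  | _ len ih =>
    intro s cnt
    subst hlen
    match hm : PySem.List.max? pool (fun x => x) with
    | none =>
      have hnil : pool = [] := (PySem.List.max?_eq_none_iff ..).mp hm
      subst hnil
      rw [pvLoopB, hm]
      simp [pvLoopA, PySem.List.sorted]
    | some m =>
      have hmem : m ∈ pool := PySem.List.max?_mem hm
      rw [sorted_rev_eq_max_cons pool m hm, pvLoopB, hm, pvLoopA]
      simp only [PySem.List.remove?_eq_some_erase pool m hmem, Option.getD_some]
      split_ifs with h
      · rfl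
      · have hlt : (pool.erase m).length < pool.length := by
          have := List.length_erase_of_mem hmem
          have := List.length_pos_of_mem hmem
          omega
        exact ih _ hlt _ rfl _ _

-- ===== VERDICT (by name: the statement is the Claim_ definition above) =====
theorem min_battery_swaps_spec : Claim_equal_min_battery_swaps := by
  intro n T capacities _
  unfold Spec_min_battery_swaps min_battery_swaps min_battery_swaps_alt
  split_ifs with h
  · rfl
  · exact loopA_eq_loopB T capacities 0 0
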